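-- pv_equiv track=rewrite | github.com/MrBrantCode/unitest_baseline | mut_generate/mist_train_cf/cf_75643/solution.py | peculiar_sequence
-- ===== SOURCE A (Python) =====
-- def peculiar_sequence(num_series):
--     counter = {}
--     sequence = []
--
--     for i, v in enumerate(num_series):
--         if v not in counter:
--             counter[v] = {'index': i, 'count': 0}
--         counter[v]['count'] += 1
--
--     for k, v in counter.items():
--         if v['count'] < 2*k:
--             sequence.append((k, v['index']))
--
--     sequence.sort(key=lambda x: x[1])
--
--     return sequence
-- ===== SOURCE B (Python) =====
-- def peculiar_sequence(num_series):
--     freq = {}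
--     for v in num_series:
--         freq[v] = freq.get(v, 0) + 1
--     seen = set()
--     result = []
--     for i, v in enumerate(num_series):
--         if v not in seen:
--             seen.add(v)
--             if freq[v] < 2 * v:
--                 result.append((v, i))
--     return result
-- ===== Notes on version B (the rewrite author's own statement) =====
-- stated objective: simpler
-- what changed: B replaces A's index/count record dict plus post-hoc filter over dict items plus a sort by a counting pass followed by a seen-set scan of the original list that emits qualifying first occurrences already in index order, so no sort is needed.
import Mathlib
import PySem

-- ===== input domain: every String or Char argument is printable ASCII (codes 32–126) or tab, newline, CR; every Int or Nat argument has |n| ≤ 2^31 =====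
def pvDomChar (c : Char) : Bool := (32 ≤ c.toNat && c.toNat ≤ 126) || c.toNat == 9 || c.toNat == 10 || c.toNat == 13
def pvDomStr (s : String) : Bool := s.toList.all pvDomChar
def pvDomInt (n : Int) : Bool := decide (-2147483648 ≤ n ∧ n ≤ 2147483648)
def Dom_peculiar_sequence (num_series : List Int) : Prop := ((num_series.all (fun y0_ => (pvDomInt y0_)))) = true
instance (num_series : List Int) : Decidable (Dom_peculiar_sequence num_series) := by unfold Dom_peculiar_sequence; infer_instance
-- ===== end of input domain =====

-- B replaces A's index/count-record dict, dict-items filter and sort by a counting pass plus a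
-- seen-set scan of the original list, which emits qualifying first occurrences already in index order.


-- ===== PORT A =====
-- one iteration of A's first loop: "if v not in counter: counter[v] = {'index': i, 'count': 0}; counter[v]['count'] += 1"
-- (the fixed-shape inner dict {'index': …, 'count': …} is modelled as the pair (index, count))
def stepA (c : PySem.Dict Int (Int × Int)) (p : Int × Int) : PySem.Dict Int (Int × Int) :=
  let c' := if c.contains p.2 then c else c.insert p.2 (p.1, 0)
  c'.modify p.2 (0, 0) (fun r => (r.1, r.2 + 1))

def peculiar_sequence (num_series : List Int) : List (Int × Int) :=
  let counter := (PySem.List.enumerate num_series).foldl stepA PySem.Dict.empty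
  let sequence := counter.items.foldl
    (fun s kv => if kv.2.2 < 2 * kv.1 then s ++ [(kv.1, kv.2.1)] else s) []
  PySem.List.sorted sequence (fun x => x.2) false

-- ===== PORT B =====
-- one iteration of B's scan: on a first occurrence, record it and emit it when freq[v] < 2*v
def stepB (freq : PySem.Dict Int Int) (st : PySem.Set Int × List (Int × Int)) (p : Int × Int) :
    PySem.Set Int × List (Int × Int) :=
  if st.1.contains p.2 then st
  else (PySem.Set.add st.1 p.2,
        if freq.getD p.2 0 < 2 * p.2 then st.2 ++ [(p.2, p.1)] else st.2)

def peculiar_sequence_alt (num_series : List Int) : List (Int × Int) :=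
  let freq := num_series.foldl (fun d v => d.insert v (d.getD v 0 + 1)) PySem.Dict.empty
  ((PySem.List.enumerate num_series).foldl (stepB freq) (PySem.Set.empty, [])).2

-- ===== PRECONDITION & SPEC =====
def Spec_peculiar_sequence (num_series : List Int) (out : List (Int × Int)) : Prop := out = peculiar_sequence_alt num_series
instance (num_series : List Int) (out : List (Int × Int)) : Decidable (Spec_peculiar_sequence num_series out) := by unfold Spec_peculiar_sequence; infer_instance

-- ===== CLAIM (what is proved, stated in full; the proofs are below) =====
def Claim_equal_peculiar_sequence : Prop := ∀ (num_series : List Int), Dom_peculiar_sequence num_series → Spec_peculiar_sequence num_series (peculiar_sequence num_series)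

-- ===== LEMMAS AND PROOFS =====

theorem modify_eq_insert (d : PySem.Dict Int (Int × Int)) (k : Int) (d0 : Int × Int) (f : Int × Int → Int × Int) :
    d.modify k d0 f = d.insert k (f (d.getD k d0)) := rfl
theorem idxOf_append_self (xs : List Int) (x : Int) (h : x ∉ xs) :
    (xs ++ [x]).idxOf x = xs.length := by
  induction xs with
  | nil => simp
  | cons a t ih =>
    simp at h
    rw [List.cons_append, List.idxOf_cons_ne _ (by simpa using (Ne.symm h.1))]
    simp [ih h.2]
theorem ofList_append_singleton (xs : List Int) (x : Int) :
    PySem.Set.ofList (xs ++ [x]) =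
      if x ∈ xs then PySem.Set.ofList xs else PySem.Set.ofList xs ++ [x] := by
  rw [PySem.Set.ofList_eq_foldl, List.foldl_append]
  simp [← PySem.Set.ofList_eq_foldl, PySem.Set.add]
theorem counterA_items (xs : List Int) :
    ((PySem.List.enumerate xs).foldl stepA PySem.Dict.empty).items =
      (PySem.Set.ofList xs).map
        (fun v => (v, ((xs.idxOf v : Int), (xs.count v : Int)))) := by
  induction xs using List.reverseRecOn with
  | nil => rfl
  | append_singleton xs x ih =>
    rw [PySem.List.enumerate_append, List.foldl_append]
    simp only [PySem.List.enumerate_cons, PySem.List.enumerate_nil, List.foldl_cons, List.foldl_nil]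
    have hkeys : ((PySem.List.enumerate xs).foldl stepA PySem.Dict.empty).keys = PySem.Set.ofList xs := by
      rw [PySem.Dict.keys, ih, List.map_map]
      exact List.map_id _
    have hnd : ((PySem.List.enumerate xs).foldl stepA PySem.Dict.empty).keys.Nodup := by
      rw [hkeys]; exact PySem.Set.nodup_ofList xs
    have hcont : ((PySem.List.enumerate xs).foldl stepA PySem.Dict.empty).contains x = decide (x ∈ xs) := by
      rw [PySem.Dict.contains_eq_decide_mem_keys, hkeys]
      simp [PySem.Set.mem_ofList]
    rw [ofList_append_singleton]
    by_cases hx : x ∈ xs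
    · -- seen before: modify bumps the count in place
      have hmem : (x, ((xs.idxOf x : Int), (xs.count x : Int))) ∈
          ((PySem.List.enumerate xs).foldl stepA PySem.Dict.empty).items := by
        rw [ih]; exact List.mem_map_of_mem (by simpa [PySem.Set.mem_ofList] using hx)
      have hgetD : ((PySem.List.enumerate xs).foldl stepA PySem.Dict.empty).getD x (0,0) =
          ((xs.idxOf x : Int), (xs.count x : Int)) :=
        PySem.Dict.getD_of_mem_items _ hmem hnd (0,0)
      simp only [stepA, hcont, hx, decide_true, if_true, modify_eq_insert, hgetD]
      rw [PySem.Dict.items_insert_of_contains _ _ (by simp [hcont, hx])]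
      rw [ih, List.map_map]
      apply List.map_congr_left
      intro v hv
      have hvxs : v ∈ xs := (PySem.Set.mem_ofList xs v).mp hv
      by_cases hvx : v = x
      · subst hvx
        simp [List.idxOf_append_of_mem hvxs, List.count_append]
      · simp [hvx, List.idxOf_append_of_mem hvxs, List.count_append, (Ne.symm hvx : x ≠ v)]
    · -- fresh: insert (i,0) then bump to (i,1), appended at the end
      simp only [stepA, hcont, modify_eq_insert]
      rw [if_neg (by simp [hx])]
      rw [PySem.Dict.getD_insert_self, PySem.Dict.insert_insert_self]
      rw [PySem.Dict.items_insert_of_not_contains _ _ (by simp [hcont, hx])]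
      rw [ih, if_neg hx, List.map_append]
      congr 1
      · apply List.map_congr_left
        intro v hv
        have hvxs : v ∈ xs := (PySem.Set.mem_ofList xs v).mp hv
        have hne : v ≠ x := fun h => hx (h ▸ hvxs)
        simp [List.idxOf_append_of_mem hvxs, List.count_append, hne.symm]
      · simp [idxOf_append_self xs x hx, List.count_append, List.count_eq_zero_of_not_mem hx]
theorem scanB_eq (freq : PySem.Dict Int Int) (xs : List Int) :
    (PySem.List.enumerate xs).foldl (stepB freq) (PySem.Set.empty, []) =
      (PySem.Set.ofList xs,
       ((PySem.Set.ofList xs).filter (fun v => freq.getD v 0 < 2 * v)).map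
         (fun v => (v, (xs.idxOf v : Int)))) := by
  induction xs using List.reverseRecOn with
  | nil => rfl
  | append_singleton xs x ih =>
    rw [PySem.List.enumerate_append, List.foldl_append]
    simp only [PySem.List.enumerate_cons, PySem.List.enumerate_nil, List.foldl_cons, List.foldl_nil]
    rw [ih, ofList_append_singleton]
    by_cases hx : x ∈ xs
    · simp only [stepB]
      rw [if_pos (by simp [PySem.Set.mem_ofList, hx]), if_pos hx]
      refine Prod.ext rfl ?_
      apply List.map_congr_left
      intro v hv
      have hvxs : v ∈ xs := (PySem.Set.mem_ofList xs v).mp (List.mem_of_mem_filter hv)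
      simp [List.idxOf_append_of_mem hvxs]
    · simp only [stepB]
      rw [if_neg (by simp [PySem.Set.mem_ofList, hx]), if_neg hx]
      refine Prod.ext ?_ ?_
      · simp [PySem.Set.add, PySem.Set.mem_ofList, hx]
      · simp only [List.filter_append, List.map_append]
        have hmc : ∀ l : List Int, (∀ v ∈ l, v ∈ xs) →
            l.map (fun v => (v, ((xs ++ [x]).idxOf v : Int))) = l.map (fun v => (v, (xs.idxOf v : Int))) := by
          intro l hl
          apply List.map_congr_left
          intro v hv
          simp [List.idxOf_append_of_mem (hl v hv)]
        rw [hmc _ (fun v hv => (PySem.Set.mem_ofList xs v).mp (List.mem_of_mem_filter hv))]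
        by_cases hf : freq.getD x 0 < 2 * x
        · simp [hf, idxOf_append_self xs x hx]
        · simp [hf]
theorem ofList_pairwise_idxOf (xs : List Int) :
    (PySem.Set.ofList xs).Pairwise (fun a b => xs.idxOf a < xs.idxOf b) := by
  induction xs using List.reverseRecOn with
  | nil => simp [PySem.Set.ofList]
  | append_singleton xs x ih =>
    rw [ofList_append_singleton]
    by_cases hx : x ∈ xs
    · rw [if_pos hx]
      refine ih.imp_of_mem ?_
      intro a b ha hb hab
      have ha' := (PySem.Set.mem_ofList xs a).mp ha
      have hb' := (PySem.Set.mem_ofList xs b).mp hb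
      rw [List.idxOf_append_of_mem ha', List.idxOf_append_of_mem hb']
      exact hab
    · rw [if_neg hx, List.pairwise_append]
      refine ⟨ih.imp_of_mem ?_, List.pairwise_singleton _ _, ?_⟩
      · intro a b ha hb hab
        have ha' := (PySem.Set.mem_ofList xs a).mp ha
        have hb' := (PySem.Set.mem_ofList xs b).mp hb
        rw [List.idxOf_append_of_mem ha', List.idxOf_append_of_mem hb']
        exact hab
      · intro a ha b hb
        rw [List.mem_singleton] at hb; subst hb
        have ha' := (PySem.Set.mem_ofList xs a).mp ha
        rw [List.idxOf_append_of_mem ha', idxOf_append_self xs b hx]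
        exact List.idxOf_lt_length_of_mem ha'
theorem freqB_getD (xs : List Int) (v : Int) :
    (xs.foldl (fun d v => d.insert v (d.getD v 0 + 1)) PySem.Dict.empty).getD v 0 =
      (xs.count v : Int) := by
  rw [PySem.Dict.getD_foldl_insert_add_one]
  simp

-- ===== VERDICT (by name: the statement is the Claim_ definition above) =====
theorem peculiar_sequence_spec : Claim_equal_peculiar_sequence := by
  intro xs _
  show peculiar_sequence xs = peculiar_sequence_alt xs
  simp only [peculiar_sequence, peculiar_sequence_alt, scanB_eq, counterA_items, freqB_getD]
  rw [PySem.List.foldl_ite_eq_foldl_filter (p := fun kv : Int × Int × Int => kv.2.2 < 2 * kv.1)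
      (f := fun s kv => s ++ [(kv.1, kv.2.1)])]
  rw [PySem.List.foldl_append_singleton_eq_map]
  rw [List.filter_map, List.map_map, List.nil_append]
  apply PySem.List.sorted_eq_self_of_pairwise
  have hp := (ofList_pairwise_idxOf xs).filter
    (p := fun v => decide ((xs.count v : Int) < 2 * v))
  rw [List.pairwise_map]
  refine hp.imp ?_
  intro a b hab
  show ((xs.idxOf a : Int)) ≤ (xs.idxOf b : Int)
  exact_mod_cast le_of_lt hab
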